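-- pv_equiv track=rewrite | github.com/kristhian21/Teor-a-cu-ntica-b-sica | Complex_Vector_Spaces.py | productoTensor
-- ===== SOURCE A (Python) =====
-- def productoComplejos(c1, c2):
--     a = (c1[0] * c2[0]) + (-(c1[1] * c2[1]))
--     b = (c1[0] * c2[1]) + (c1[1] * c2[0])
--
--     return a, b
--
-- def multiplicacionEscalar(escalar, v):
--     result = []
--     longitud = len(v)
--
--     for i in range(longitud):
--         producto = productoComplejos(escalar, v[i])
--         result.append(producto)
--
--     return result
--
-- def multiplicacionEscalar_M(escalar, matriz):
--     filas = len(matriz)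
--     result = []
--
--     for i in range(filas):
--         producto = multiplicacionEscalar(escalar, matriz[i])
--         result.append(producto)
--
--     return result
--
-- def productoTensor(a, b):
--     result = [[[[]] for j in range(len(a[0]) * len(b[0]))] for i in range(len(a) * len(b))]
--
--     for i in range(len(a) * len(b)):
--         for j in range(len(a[0]) * len(b[0])):
--             x, y = i // len(b), j // len(b[0])
--             res = multiplicacionEscalar_M(a[x][y], b)
--             x1, y1 = i % len(b), j % len(b[0])
--             result[i][j] = res[x1][y1]
--     return result
-- ===== SOURCE B (Python) =====
-- def productoTensor(a, b):
--     # Kronecker product built block-row by block-row: each output entry is one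
--     # complex multiplication a-entry * b-entry; no intermediate scaled copy of b.
--     na = len(a[0])
--     q = len(b[0])
--     result = []
--     for ar in a:
--         for br in b:
--             result.append([(ar[y][0] * br[y1][0] - ar[y][1] * br[y1][1],
--                             ar[y][0] * br[y1][1] + ar[y][1] * br[y1][0])
--                            for y in range(na) for y1 in range(q)])
--     return result
-- ===== Notes on version B (the rewrite author's own statement) =====
-- stated objective: faster
-- what changed: A rebuilds a full scaled copy of the whole matrix b (multiplicacionEscalar_M) for every single output cell and then picks one entry from it; B walks block-rows (a-row x b-row) once and computes each output cell as a single complex multiplication with no scaled copies and no div/mod index arithmetic. Pre_ excludes the inputs where A raises IndexError (ragged rows reached by the index loops) and also the empty a or b, where A's comprehension over range(0) never evaluates a[0]/b[0] and accidentally returns [] while B, evaluating len(a[0]) and len(b[0]) up front, raises.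
-- outside the precondition, e.g. on productoTensor([], []): A returns [], B raises IndexError; on productoTensor([[(1, 0)]], []): A returns [], B raises IndexError; on productoTensor([], [[(1, 0)]]): A returns [], B raises IndexError
import Mathlib
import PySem

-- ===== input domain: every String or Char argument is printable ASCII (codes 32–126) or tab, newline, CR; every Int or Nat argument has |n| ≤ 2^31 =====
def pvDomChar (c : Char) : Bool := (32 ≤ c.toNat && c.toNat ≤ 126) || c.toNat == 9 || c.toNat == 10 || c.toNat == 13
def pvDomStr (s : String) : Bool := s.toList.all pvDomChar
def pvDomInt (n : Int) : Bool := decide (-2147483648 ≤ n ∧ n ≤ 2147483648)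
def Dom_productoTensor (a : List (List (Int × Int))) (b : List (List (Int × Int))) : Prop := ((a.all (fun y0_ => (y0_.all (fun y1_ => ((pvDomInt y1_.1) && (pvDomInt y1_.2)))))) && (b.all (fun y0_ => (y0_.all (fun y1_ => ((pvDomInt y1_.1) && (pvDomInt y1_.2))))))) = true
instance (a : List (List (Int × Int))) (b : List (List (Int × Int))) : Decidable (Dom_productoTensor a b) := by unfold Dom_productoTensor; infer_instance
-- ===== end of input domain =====

-- B computes each Kronecker-product cell as ONE complex multiplication while walking
-- block-rows (a-row × b-row); A rebuilds a scaled copy of all of b per output cell (objective: faster).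

-- ===== PORT A =====
def pC (c1 c2 : Int × Int) : Int × Int :=
  ((c1.1 * c2.1) + (-(c1.2 * c2.2)), (c1.1 * c2.2) + (c1.2 * c2.1))

def mE (escalar : Int × Int) (v : List (Int × Int)) : List (Int × Int) :=
  (PySem.List.pyRange 0 (PySem.List.len v)).foldl
    (fun result i => result ++ [pC escalar (PySem.List.pyGetD v i (0, 0))]) []

def mEM (escalar : Int × Int) (matriz : List (List (Int × Int))) : List (List (Int × Int)) :=
  (PySem.List.pyRange 0 (PySem.List.len matriz)).foldl
    (fun result i => result ++ [mE escalar (PySem.List.pyGetD matriz i [])]) []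

-- literal port of A; Python's throw-away placeholder [[]] (not a complex number) is ported
-- as the placeholder (0,0): on every admitted input each cell is overwritten before being read
def productoTensor (a : List (List (Int × Int))) (b : List (List (Int × Int))) : List (List (Int × Int)) :=
  let result : List (List (Int × Int)) :=
    (PySem.List.pyRange 0 (PySem.List.len a * PySem.List.len b)).map (fun _ =>
      (PySem.List.pyRange 0 (PySem.List.len (PySem.List.pyGetD a 0 []) * PySem.List.len (PySem.List.pyGetD b 0 []))).map
        (fun _ => ((0 : Int), (0 : Int))))
  (PySem.List.pyRange 0 (PySem.List.len a * PySem.List.len b)).foldl (fun result i =>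
    (PySem.List.pyRange 0 (PySem.List.len (PySem.List.pyGetD a 0 []) * PySem.List.len (PySem.List.pyGetD b 0 []))).foldl
      (fun result j =>
        let x := PySem.Int.floordiv i (PySem.List.len b)
        let y := PySem.Int.floordiv j (PySem.List.len (PySem.List.pyGetD b 0 []))
        let res := mEM (PySem.List.pyGetD (PySem.List.pyGetD a x []) y (0, 0)) b
        let x1 := PySem.Int.mod i (PySem.List.len b)
        let y1 := PySem.Int.mod j (PySem.List.len (PySem.List.pyGetD b 0 []))
        result.set i.toNat ((PySem.List.pyGetD result i []).set j.toNat
          (PySem.List.pyGetD (PySem.List.pyGetD res x1 []) y1 (0, 0))))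
      result) result

-- ===== PORT B =====
def cmulB (c1 c2 : Int × Int) : Int × Int :=
  (c1.1 * c2.1 - c1.2 * c2.2, c1.1 * c2.2 + c1.2 * c2.1)

def productoTensor_alt (a : List (List (Int × Int))) (b : List (List (Int × Int))) : List (List (Int × Int)) :=
  let na := PySem.List.len (PySem.List.pyGetD a 0 [])
  let q := PySem.List.len (PySem.List.pyGetD b 0 [])
  a.foldl (fun result ar =>
    b.foldl (fun result br =>
      result ++ [(PySem.List.pyRange 0 na).flatMap (fun y =>
        (PySem.List.pyRange 0 q).map (fun y1 =>
          cmulB (PySem.List.pyGetD ar y (0, 0)) (PySem.List.pyGetD br y1 (0, 0))))])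
      result) []

-- ===== PRECONDITION & SPEC =====
-- Pre_ excludes the inputs where A raises IndexError (a row shorter than the first row of its
-- matrix, reached when both index loops run) and the empty a or b, where A's comprehension over
-- range(0) never evaluates a[0]/b[0] and accidentally returns [] while B, evaluating
-- len(a[0]) and len(b[0]) up front, raises IndexError.
def Pre_productoTensor (a : List (List (Int × Int))) (b : List (List (Int × Int))) : Prop :=
  a ≠ [] ∧ b ≠ [] ∧
    ((a.headI.length ≠ 0 ∧ b.headI.length ≠ 0) →
      (∀ r ∈ a, a.headI.length ≤ r.length) ∧ (∀ r ∈ b, b.headI.length ≤ r.length))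
instance (a : List (List (Int × Int))) (b : List (List (Int × Int))) : Decidable (Pre_productoTensor a b) := by
  unfold Pre_productoTensor; infer_instance

def pvWitness_productoTensor : (List (List (Int × Int))) × (List (List (Int × Int))) :=
  ([[(1, 2)], [(0, -1)]], [[(3, 4), (5, 0)]])

def Spec_productoTensor (a : List (List (Int × Int))) (b : List (List (Int × Int))) (out : List (List (Int × Int))) : Prop := out = productoTensor_alt a b
instance (a : List (List (Int × Int))) (b : List (List (Int × Int))) (out : List (List (Int × Int))) : Decidable (Spec_productoTensor a b out) := by unfold Spec_productoTensor; infer_instance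

-- ===== CLAIM (what is proved, stated in full; the proofs are below) =====
def Claim_equal_productoTensor : Prop := ∀ (a : List (List (Int × Int))) (b : List (List (Int × Int))), Dom_productoTensor a b → Pre_productoTensor a b → Spec_productoTensor a b (productoTensor a b)

-- ===== LEMMAS AND PROOFS =====

-- generic list facts used by the fill characterisation
theorem pv_set_getD_self {g : Type} (l : List (List g)) (i : Nat) :
    l.set i (l.getD i []) = l := by
  by_cases h : i < l.length
  · rw [List.getD_eq_getElem _ _ h]; exact List.set_getElem_self h
  · exact List.set_eq_of_length_le (by omega)

theorem pv_set_append_len {g : Type} (l m : List g) (a : g) :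
    (l ++ m).set l.length a = l ++ m.set 0 a := by
  induction l with
  | nil => rfl
  | cons x l ih => simp [ih]

theorem pv_getD_append_len {g : Type} (l m : List g) (d : g) :
    (l ++ m).getD l.length d = m.getD 0 d := by
  induction l with
  | nil => rfl
  | cons x l ih => simpa [List.getD] using ih

theorem pv_set_append_at {g : Type} (l m : List g) (a : g) (N : Nat) (h : l.length = N) :
    (l ++ m).set N a = l ++ m.set 0 a := by subst h; exact pv_set_append_len l m a

theorem pv_getD_append_at {g : Type} (l m : List g) (d : g) (N : Nat) (h : l.length = N) :
    (l ++ m).getD N d = m.getD 0 d := by subst h; exact pv_getD_append_len l m d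

theorem pv_getD_range_self {g : Type} (l : List g) (d : g) :
    (List.range l.length).map (fun i => l.getD i d) = l := by
  apply List.ext_getElem (by simp)
  intro i h1 h2
  simp [List.getElem?_eq_getElem h2]

theorem pv_flatMap_map {g d e : Type} (l : List g) (f : g → d) (h : d → List e) :
    (l.map f).flatMap h = l.flatMap (fun x => h (f x)) := by
  induction l with
  | nil => rfl
  | cons x l ih => simp [ih]

-- the double index loop over range (m*n) is the block enumeration
theorem pv_range_mul_map {g : Type} (m n : Nat) (f : Nat → Nat → g) :
    (List.range (m * n)).map (fun k => f (k / n) (k % n))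
      = (List.range m).flatMap (fun i => (List.range n).map (f i)) := by
  rcases Nat.eq_zero_or_pos n with hn | hn
  · simp [hn]
  · induction m with
    | zero => simp
    | succ m ih =>
      have hmn : (m + 1) * n = m * n + n := by ring
      rw [hmn, List.range_add, List.map_append, List.map_map,
          List.range_succ, List.flatMap_append, ← ih]
      congr 1
      simp
      intro t htn
      have h1 : (m * n + t) / n = m := by
        rw [Nat.mul_comm m n, Nat.mul_add_div hn, Nat.div_eq_of_lt htn]
        omega
      rw [h1, Nat.mod_eq_of_lt htn]

theorem pv_flatMap_map_as_range {g d : Type} (a b : List g) (dg : g) (h : g → g → d) :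
    (List.range (a.length * b.length)).map
        (fun k => h (a.getD (k / b.length) dg) (b.getD (k % b.length) dg))
      = a.flatMap (fun x => b.map (h x)) := by
  have hb : ∀ x : g, (List.range b.length).map (fun k => h x (b.getD k dg)) = b.map (h x) := by
    intro x
    conv_rhs => rw [← pv_getD_range_self b dg]
    rw [List.map_map]; rfl
  have ha := pv_getD_range_self a dg
  refine (pv_range_mul_map a.length b.length
    (fun x y => h (a.getD x dg) (b.getD y dg))).trans ?_
  conv_rhs => rw [← ha]
  rw [pv_flatMap_map]
  exact congrArg (fun F => List.flatMap F (List.range a.length))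
    (funext fun i => hb (a.getD i dg))

-- the row-fill loop produces the mapped row
theorem pv_rowfill {g : Type} (v : Nat → g) :
    ∀ (N : Nat) (r : List g), N ≤ r.length →
      (List.range N).foldl (fun row j => row.set j (v j)) r
        = (List.range N).map v ++ r.drop N := by
  intro N
  induction N with
  | zero => simp
  | succ N ih =>
    intro r h
    have hlen : ((List.range N).map v).length = N := by simp
    rw [List.range_succ, List.foldl_append, List.foldl_cons, List.foldl_nil,
        ih r (by omega), pv_set_append_at _ _ _ N hlen,
        List.drop_eq_getElem_cons (by omega : N < r.length), List.set_cons_zero]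
    simp

-- hoisting: the inner loop only rewrites row i
theorem pv_hoist {g : Type} (v : Nat → g) (js : List Nat) :
    ∀ (res : List (List g)) (i : Nat),
      js.foldl (fun r j => r.set i ((r.getD i []).set j (v j))) res
        = res.set i (js.foldl (fun row j => row.set j (v j)) (res.getD i [])) := by
  induction js with
  | nil =>
    intro res i
    rw [List.foldl_nil, List.foldl_nil, pv_set_getD_self]
  | cons j js ih =>
    intro res i
    rw [List.foldl_cons, ih, List.foldl_cons]
    by_cases h : i < res.length
    · rw [List.set_set]
      congr 2
      rw [List.getD_eq_getElem _ [] (by simpa using h), List.getElem_set_self,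
          List.getD_eq_getElem _ [] h]
    · have h1 : res.set i ((res.getD i []).set j (v j)) = res :=
        List.set_eq_of_length_le (by omega)
      have h2 : res.getD i [] = ([] : List g) := List.getD_eq_default _ _ (by omega)
      rw [h1, h2]
      simp

-- the outer fill loop over rows
theorem pv_outerfill {g : Type} (gg : Nat → List g → List g) :
    ∀ (M : Nat) (init : List (List g)), M ≤ init.length →
      (List.range M).foldl (fun res i => res.set i (gg i (res.getD i []))) init
        = (List.range M).map (fun i => gg i (init.getD i [])) ++ init.drop M := by
  intro M
  induction M with
  | zero => simp
  | succ M ih =>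
    intro init h
    have hlen : ((List.range M).map (fun i => gg i (init.getD i []))).length = M := by simp
    have hget : ((List.range M).map (fun i => gg i (init.getD i [])) ++ init.drop M).getD M []
        = init.getD M [] := by
      rw [pv_getD_append_at _ _ _ M hlen,
          List.drop_eq_getElem_cons (by omega : M < init.length), List.getD_cons_zero,
          List.getD_eq_getElem _ _ (by omega : M < init.length)]
    rw [List.range_succ, List.foldl_append, List.foldl_cons, List.foldl_nil,
        ih init (by omega), hget, pv_set_append_at _ _ _ M hlen,
        List.drop_eq_getElem_cons (by omega : M < init.length), List.set_cons_zero]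
    simp

-- the whole fill loop of A, generically: overwrite every cell of an M×N placeholder
theorem pv_fill {g : Type} (M N : Nat) (v : Nat → Nat → g) (d : g) :
    (List.range M).foldl (fun res i =>
        (List.range N).foldl (fun r j => r.set i ((r.getD i []).set j (v i j))) res)
      ((List.range M).map (fun _ => (List.range N).map (fun _ => d)))
    = (List.range M).map (fun i => (List.range N).map (fun j => v i j)) := by
  have h1 : (fun (res : List (List g)) (i : Nat) =>
        (List.range N).foldl (fun r j => r.set i ((r.getD i []).set j (v i j))) res)
      = (fun res i =>
          res.set i ((List.range N).foldl (fun row j => row.set j (v i j)) (res.getD i []))) :=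
    funext fun res => funext fun i => pv_hoist (v i) (List.range N) res i
  rw [h1, pv_outerfill (fun i row => (List.range N).foldl (fun row j => row.set j (v i j)) row)
        M _ (by simp)]
  rw [List.drop_eq_nil_of_le (by simp), List.append_nil]
  apply List.map_congr_left
  intro i hi
  rw [PySem.List.getD_map_range _ _ _ _ (List.mem_range.mp hi),
      pv_rowfill (v i) N _ (by simp), List.drop_eq_nil_of_le (by simp), List.append_nil]

theorem mE_eq (e : Int × Int) (v : List (Int × Int)) : mE e v = v.map (pC e) := by
  unfold mE
  rw [PySem.List.foldl_append_singleton_eq_map, List.nil_append,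
      show (fun i => pC e (PySem.List.pyGetD v i (0, 0)))
          = (pC e) ∘ (fun i => PySem.List.pyGetD v i (0, 0)) from rfl,
      ← List.map_map, PySem.List.map_pyGetD_pyRange_zero]

theorem mEM_eq (e : Int × Int) (m : List (List (Int × Int))) :
    mEM e m = m.map (fun r => r.map (pC e)) := by
  unfold mEM
  rw [PySem.List.foldl_append_singleton_eq_map, List.nil_append,
      show (fun i => mE e (PySem.List.pyGetD m i []))
          = (mE e) ∘ (fun i => PySem.List.pyGetD m i []) from rfl,
      ← List.map_map, PySem.List.map_pyGetD_pyRange_zero]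
  exact List.map_congr_left (fun r _ => mE_eq e r)

-- shape of port A: a plain double map over index ranges
theorem A_shape (a b : List (List (Int × Int))) :
    productoTensor a b
      = (List.range (a.length * b.length)).map (fun i =>
          (List.range ((a.getD 0 []).length * (b.getD 0 []).length)).map (fun j =>
            ((mEM ((a.getD (i / b.length) []).getD (j / (b.getD 0 []).length) (0, 0)) b).getD
                (i % b.length) []).getD (j % (b.getD 0 []).length) (0, 0))) := by
  unfold productoTensor
  simp only [PySem.List.len, PySem.List.pyGetD_ofNat', ← Nat.cast_mul,
    PySem.List.pyRange_zero_natCast, List.foldl_map, List.map_map,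
    Int.toNat_natCast, PySem.List.pyGetD_natCast,
    PySem.Int.floordiv_natCast, PySem.Int.mod_natCast]
  exact pv_fill (a.length * b.length) ((a.getD 0 []).length * (b.getD 0 []).length)
    (fun i j =>
      ((mEM ((a.getD (i / b.length) []).getD (j / (b.getD 0 []).length) (0, 0)) b).getD
          (i % b.length) []).getD (j % (b.getD 0 []).length) (0, 0)) ((0 : Int), (0 : Int))

-- shape of port B: the same double map with a direct one-shot cell product
theorem B_shape (a b : List (List (Int × Int))) :
    productoTensor_alt a b
      = (List.range (a.length * b.length)).map (fun i =>
          (List.range ((a.getD 0 []).length * (b.getD 0 []).length)).map (fun j =>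
            cmulB ((a.getD (i / b.length) []).getD (j / (b.getD 0 []).length) (0, 0))
              ((b.getD (i % b.length) []).getD (j % (b.getD 0 []).length) (0, 0)))) := by
  unfold productoTensor_alt
  simp only [PySem.List.len, PySem.List.pyGetD_ofNat', PySem.List.pyRange_zero_natCast,
    List.map_map, Function.comp_def, PySem.List.pyGetD_natCast, pv_flatMap_map]
  rw [show (fun (result : List (List (Int × Int))) (ar : List (Int × Int)) =>
        List.foldl (fun result br => result ++
          [List.flatMap (fun y => List.map (fun y1 =>
              cmulB (ar.getD y (0, 0)) (br.getD y1 (0, 0)))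
            (List.range (b.getD 0 []).length)) (List.range (a.getD 0 []).length)]) result b)
      = (fun result ar => result ++ b.map (fun br =>
          List.flatMap (fun y => List.map (fun y1 =>
              cmulB (ar.getD y (0, 0)) (br.getD y1 (0, 0)))
            (List.range (b.getD 0 []).length)) (List.range (a.getD 0 []).length))) from
    funext fun res => funext fun ar => PySem.List.foldl_append_singleton_eq_map _ b res]
  rw [PySem.List.foldl_append_eq_flatMap, List.nil_append,
      ← pv_flatMap_map_as_range a b [] (fun ar br =>
        List.flatMap (fun y => List.map (fun y1 =>
            cmulB (ar.getD y (0, 0)) (br.getD y1 (0, 0)))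
          (List.range (b.getD 0 []).length)) (List.range (a.getD 0 []).length))]
  apply List.map_congr_left
  intro i _
  exact (pv_range_mul_map (a.getD 0 []).length (b.getD 0 []).length
    (fun y y1 => cmulB ((a.getD (i / b.length) []).getD y (0, 0))
      ((b.getD (i % b.length) []).getD y1 (0, 0)))).symm

theorem pC_eq_cmulB (c1 c2 : Int × Int) : pC c1 c2 = cmulB c1 c2 := by
  simp [pC, cmulB, sub_eq_add_neg]

-- ===== VERDICT (by name: the statement is the Claim_ definition above) =====
theorem productoTensor_spec : Claim_equal_productoTensor := by
  intro a b _dom _hpre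
  unfold Spec_productoTensor
  rw [A_shape, B_shape]
  rcases b with _ | ⟨r0, brest⟩
  · simp
  · apply List.map_congr_left
    intro i _
    apply List.map_congr_left
    intro j _
    set b := r0 :: brest with hbdef
    have hb0 : 0 < b.length := by simp [hbdef]
    have hx1 : i % b.length < b.length := Nat.mod_lt _ hb0
    have hrow : b.getD (i % b.length) [] = b[i % b.length] := List.getD_eq_getElem _ _ hx1
    rw [mEM_eq, List.getD_eq_getElem _ [] (by simpa using hx1), List.getElem_map, hrow]
    by_cases hy : j % (b.getD 0 []).length < b[i % b.length].length
    · rw [List.getD_eq_getElem _ _ (by simpa using hy), List.getElem_map,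
          List.getD_eq_getElem _ _ hy, pC_eq_cmulB]
    · rw [List.getD_eq_default _ _ (by simpa using Nat.le_of_not_lt hy),
          List.getD_eq_default _ _ (Nat.le_of_not_lt hy)]
      simp [cmulB]
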